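-- pv_equiv track=rewrite | github.com/QuantumPackage/qmcpack | qp_convert_qmcpack_to_ezfio.py | order_l_l_sym
-- ===== SOURCE A (Python) =====
-- import functools
--
-- d_gms_order ={ 0:["s"],
--      1:[ "x", "y", "z" ],
--      2:[ "xx", "yy", "zz", "xy", "xz", "yz" ],
--      3:[ "xxx", "yyy", "zzz", "xxy", "xxz", "yyx", "yyz", "zzx", "zzy", "xyz"],
--      4: ["xxxx", "yyyy", "zzzz", "xxxy", "xxxz", "yyyx", "yyyz", "zzzx", "zzzy", "xxyy", "xxzz", "yyzz", "xxyz", "yyxz", "zzxy", "xxxx", "yyyy", "zzzz", "xxxy", "xxxz", "yyyx", "yyyz", "zzzx", "zzzy", "xxyy", "xxzz", "yyzz", "xxyz", "yyxz","zzxy"],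
--      5:["xxxxx","yyyyy","zzzzz","xxxxy","xxxxz","yyyyx","yyyyz","zzzzx","zzzzy","xxxyy","xxxzz","yyyxx","yyyzz","zzzxx","zzzyy","xxxyz","yyyxz","zzzxy","xxyyz","xxzzy","yyzzx"],
--      6:["xxxxxx","yyyyyy","zzzzzz","xxxxxy","xxxxxz","yyyyyx","yyyyyz","zzzzzx","zzzzzy","xxxxyy","xxxxzz","yyyyxx","yyyyzz","zzzzxx","zzzzyy","xxxxyz","yyyyxz","zzzzxy","xxxyyy","xxxzzz","yyyzzz","xxxyyz","xxxzzy","yyyxxz","yyyzzx","zzzxxy","zzzyyx","xxyyzz"],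
-- }
--
-- def compare_gamess_style(item1, item2):
--     def cmp(a, b):
--         return (a > b) - (a < b)
--     item1=item1[2]
--     item2=item2[2]
--     n1,n2 = map(len,(item1,item2))
--     assert (n1 == n2)
--     try:
--         l = d_gms_order[n1]
--     except KeyError:
--         return 0
-- #       raise (KeyError, "We dont handle L than 4")
--     else:
--         a = l.index(item1)
--         b = l.index(item2)
--         return cmp( a, b )
--
-- def n_orbital(n):
--     if n==0:
--         return 1
--     elif n==1:
--         return 3
--     else:
--         return 2*n_orbital(n-1)-n_orbital(n-2)+1
--
-- def get_nb_permutation(str_):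
--     if (str_) == 's': return 1
--     else: return n_orbital(len(str_))
--
-- def order_l_l_sym(l_l_sym):
--     n = 1
--     iter_ = range(len(l_l_sym))
--     for i in iter_:
--         if n != 1:
--             n += -1
--             continue
--
--         l = l_l_sym[i]
--         n = get_nb_permutation(l[2])
--
--         l_l_sym[i:i + n] = sorted(l_l_sym[i:i + n],
--                                   key=functools.cmp_to_key(compare_gamess_style))
--
--
--     return l_l_sym
-- ===== SOURCE B (Python) =====
-- # B: same grouping-and-sort behaviour, but the group size comes from the closed form
-- # (k+1)(k+2)/2 instead of the n_orbital recurrence, the list is consumed group by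
-- # group (no per-index skip counter), and each group is sorted with an integer key
-- # (position in the GAMESS table) instead of a cmp_to_key comparator.
-- d_gms_order = {0: ["s"],
--     1: ["x", "y", "z"],
--     2: ["xx", "yy", "zz", "xy", "xz", "yz"],
--     3: ["xxx", "yyy", "zzz", "xxy", "xxz", "yyx", "yyz", "zzx", "zzy", "xyz"],
--     4: ["xxxx", "yyyy", "zzzz", "xxxy", "xxxz", "yyyx", "yyyz", "zzzx", "zzzy", "xxyy", "xxzz", "yyzz", "xxyz", "yyxz", "zzxy", "xxxx", "yyyy", "zzzz", "xxxy", "xxxz", "yyyx", "yyyz", "zzzx", "zzzy", "xxyy", "xxzz", "yyzz", "xxyz", "yyxz", "zzxy"],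
--     5: ["xxxxx", "yyyyy", "zzzzz", "xxxxy", "xxxxz", "yyyyx", "yyyyz", "zzzzx", "zzzzy", "xxxyy", "xxxzz", "yyyxx", "yyyzz", "zzzxx", "zzzyy", "xxxyz", "yyyxz", "zzzxy", "xxyyz", "xxzzy", "yyzzx"],
--     6: ["xxxxxx", "yyyyyy", "zzzzzz", "xxxxxy", "xxxxxz", "yyyyyx", "yyyyyz", "zzzzzx", "zzzzzy", "xxxxyy", "xxxxzz", "yyyyxx", "yyyyzz", "zzzzxx", "zzzzyy", "xxxxyz", "yyyyxz", "zzzzxy", "xxxyyy", "xxxzzz", "yyyzzz", "xxxyyz", "xxxzzy", "yyyxxz", "yyyzzx", "zzzxxy", "zzzyyx", "xxyyzz"],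
-- }
--
-- def get_nb_permutation(str_):
--     if str_ == 's':
--         return 1
--     k = len(str_)
--     return (k + 1) * (k + 2) // 2
--
-- def order_l_l_sym(l_l_sym):
--     out = []
--     rest = l_l_sym[:]
--     while rest:
--         lbl = rest[0][2]
--         n = get_nb_permutation(lbl)
--         group, rest = rest[:n], rest[n:]
--         order = d_gms_order.get(len(lbl))
--         if order is not None and len(group) > 1:
--             group = sorted(group, key=lambda it: order.index(it[2]))
--         out += group
--     l_l_sym[:] = out   # same net in-place update as A
--     return l_l_sym
-- ===== Notes on version B (the rewrite author's own statement) =====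
-- stated objective: simpler
-- what changed: B replaces the n_orbital recurrence by its closed form (k+1)(k+2)//2, consumes the list group by group (take/drop) instead of A's indexed loop with a skip-counter and slice reassignment, and sorts each group with a plain integer key (position in the GAMESS table) instead of a functools.cmp_to_key comparator.
import Mathlib
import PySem

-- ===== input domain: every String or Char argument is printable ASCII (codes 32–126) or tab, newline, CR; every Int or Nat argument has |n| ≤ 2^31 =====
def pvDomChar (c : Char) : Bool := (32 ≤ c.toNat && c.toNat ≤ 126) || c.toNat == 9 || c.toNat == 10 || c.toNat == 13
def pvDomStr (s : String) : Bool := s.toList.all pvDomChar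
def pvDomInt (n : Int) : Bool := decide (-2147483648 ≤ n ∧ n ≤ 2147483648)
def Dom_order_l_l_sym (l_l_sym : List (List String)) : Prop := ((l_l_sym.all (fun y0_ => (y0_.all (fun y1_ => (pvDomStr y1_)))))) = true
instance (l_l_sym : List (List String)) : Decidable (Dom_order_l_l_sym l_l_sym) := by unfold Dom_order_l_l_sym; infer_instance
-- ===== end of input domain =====

-- B re-implements A's per-shell GAMESS reordering with the closed form (k+1)(k+2)/2 for the
-- group size (instead of the n_orbital recurrence), group-by-group list consumption (instead of
-- the per-index skip counter), and an integer sort key (instead of a cmp_to_key comparator).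
-- A mutates its argument in place (slice assignment); B performs the same net in-place update,
-- and the equivalence proved here is about the RETURN value.

-- the module constant d_gms_order, keyed by the label length (the '| _ => none' arm is the KeyError branch)
def gmsOrder? (n : Nat) : Option (List String) :=
  match n with
  | 0 => some ["s"]
  | 1 => some ["x", "y", "z"]
  | 2 => some ["xx", "yy", "zz", "xy", "xz", "yz"]
  | 3 => some ["xxx", "yyy", "zzz", "xxy", "xxz", "yyx", "yyz", "zzx", "zzy", "xyz"]
  | 4 => some ["xxxx", "yyyy", "zzzz", "xxxy", "xxxz", "yyyx", "yyyz", "zzzx", "zzzy", "xxyy", "xxzz", "yyzz", "xxyz", "yyxz", "zzxy", "xxxx", "yyyy", "zzzz", "xxxy", "xxxz", "yyyx", "yyyz", "zzzx", "zzzy", "xxyy", "xxzz", "yyzz", "xxyz", "yyxz", "zzxy"]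
  | 5 => some ["xxxxx", "yyyyy", "zzzzz", "xxxxy", "xxxxz", "yyyyx", "yyyyz", "zzzzx", "zzzzy", "xxxyy", "xxxzz", "yyyxx", "yyyzz", "zzzxx", "zzzyy", "xxxyz", "yyyxz", "zzzxy", "xxyyz", "xxzzy", "yyzzx"]
  | 6 => some ["xxxxxx", "yyyyyy", "zzzzzz", "xxxxxy", "xxxxxz", "yyyyyx", "yyyyyz", "zzzzzx", "zzzzzy", "xxxxyy", "xxxxzz", "yyyyxx", "yyyyzz", "zzzzxx", "zzzzyy", "xxxxyz", "yyyyxz", "zzzzxy", "xxxyyy", "xxxzzz", "yyyzzz", "xxxyyz", "xxxzzy", "yyyxxz", "yyyzzx", "zzzxxy", "zzzyyx", "xxyyzz"]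
  | _ => none

-- ===== PORT A =====
-- def cmp(a, b): return (a > b) - (a < b)
def pyCmp (a b : Nat) : Int := (if a > b then 1 else 0) - (if a < b then 1 else 0)

-- compare_gamess_style; item[2] and l.index raise where Pre_ fails, the defaults are never reached inside Pre_
def compare_gamess_style (item1 item2 : List String) : Int :=
  let s1 := PySem.List.pyGetD item1 2 ""
  let s2 := PySem.List.pyGetD item2 2 ""
  let n1 := s1.toList.length
  let n2 := s2.toList.length
  if n1 ≠ n2 then 0   -- Python: AssertionError (excluded by Pre_); the value is never used there
  else
    match gmsOrder? n1 with
    | none => 0       -- except KeyError: return 0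
    | some l => pyCmp ((PySem.List.index? l s1).getD 0) ((PySem.List.index? l s2).getD 0)

-- sorted(xs, key=functools.cmp_to_key(compare_gamess_style)): Python's stable sort w.r.t. the
-- comparator, ported as the stable insertion sort PySem.List.sorted itself uses (exact whenever the
-- comparator is induced by a key into a total order, which Pre_ guarantees on every sorted slice)
def sortA (xs : List (List String)) : List (List String) :=
  xs.foldl (fun acc x => PySem.List.insertBy (fun a b => decide (compare_gamess_style a b < 0)) x acc) []

def n_orbital : Nat → Int
  | 0 => 1
  | 1 => 3
  | k + 2 => 2 * n_orbital (k + 1) - n_orbital k + 1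

def get_nb_permutation (str_ : String) : Int :=
  if str_ = "s" then 1 else n_orbital str_.toList.length

-- one iteration of A's 'for i in iter_' loop; state = (skip counter n, current list)
def aBody (st : Int × List (List String)) (i : Int) : Int × List (List String) :=
  if st.1 ≠ 1 then (st.1 - 1, st.2)
  else
    let lst := st.2
    let l := PySem.List.pyGetD lst i []          -- l = l_l_sym[i] (in range: i comes from range(len))
    let lbl := PySem.List.pyGetD l 2 ""          -- l[2]; IndexError outside Pre_
    let n := get_nb_permutation lbl
    -- l_l_sym[i:i+n] = sorted(l_l_sym[i:i+n], …)  (slice assignment = l[:i] + replacement + l[i+n:])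
    (n, PySem.List.slice lst none (some i) ++ sortA (PySem.List.slice lst (some i) (some (i + n)))
          ++ PySem.List.slice lst (some (i + n)) none)

def order_l_l_sym (l_l_sym : List (List String)) : List (List String) :=
  ((PySem.List.pyRange 0 l_l_sym.length).foldl aBody (1, l_l_sym)).2

-- ===== PORT B =====
-- get_nb_permutation of Source B: the closed form (k+1)(k+2)//2
def permCount (str_ : String) : Int :=
  if str_ = "s" then 1
  else  -- k = len(str_), inlined
    PySem.Int.floordiv (((str_.toList.length : Int) + 1) * ((str_.toList.length : Int) + 2)) 2

-- key=lambda it: order.index(it[2])   (the index exists inside Pre_)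
def bKey (order : List String) (it : List String) : Nat :=
  (PySem.List.index? order (PySem.List.pyGetD it 2 "")).getD 0

-- sort one group, or leave it alone when the table has no entry / the group is trivial
def bGroup (lbl : String) (g : List (List String)) : List (List String) :=
  match gmsOrder? lbl.toList.length with
  | some order => if 1 < g.length then PySem.List.sorted g (bKey order) else g
  | none => g

-- the while loop of Source B: consume the list group by group.  The loop always strips at least one
-- row per iteration, so fuel = the list's length makes the recursion structural (never exhausted);
-- it is only a termination device, not part of Source B's algorithm.
def bGo : Nat → List (List String) → List (List String)
  | _, [] => []
  | 0, l => l   -- unreachable for fuel ≥ length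
  | fuel + 1, h :: t =>
    let lbl := PySem.List.pyGetD h 2 ""
    let n := (permCount lbl).toNat
    bGroup lbl ((h :: t).take n) ++ bGo fuel ((h :: t).drop n)

def order_l_l_sym_alt (l_l_sym : List (List String)) : List (List String) :=
  bGo l_l_sym.length l_l_sym

-- ===== PRECONDITION & SPEC =====
-- Pre_: the input is a well-formed list of shell blocks — each block head has a label at index 2,
-- and in every block of two or more rows all rows have a label of the head's length that occurs in
-- the GAMESS table (when the table has that length).  Outside this, A raises (IndexError on a short
-- row, AssertionError on mixed label lengths in one block, ValueError on a label missing from its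
-- table): exactly the inputs where Python A raises are excluded.  The predicate is a SHAPE check on
-- the input, not a run of either port: it computes no output, only walks the block decomposition,
-- which is itself recursive data (each block's size is read off its head's label; fuel = list
-- length merely makes that walk structural — each block has ≥ 1 row, so it is never exhausted).
def preCheck : Nat → List (List String) → Bool
  | _, [] => true
  | 0, _ => false   -- unreachable for fuel ≥ length
  | fuel + 1, h :: t =>
    2 < h.length &&
    (let lbl := PySem.List.pyGetD h 2 ""
     let n := (permCount lbl).toNat
     let g := (h :: t).take n
     (decide (g.length ≤ 1) ||
        g.all fun e =>
          2 < e.length &&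
          ((PySem.List.pyGetD e 2 "").toList.length == lbl.toList.length) &&
          (match gmsOrder? lbl.toList.length with
           | some order => (PySem.List.index? order (PySem.List.pyGetD e 2 "")).isSome
           | none => true)) &&
     preCheck fuel ((h :: t).drop n))

def Pre_order_l_l_sym (l_l_sym : List (List String)) : Prop :=
  preCheck l_l_sym.length l_l_sym = true
instance (l_l_sym : List (List String)) : Decidable (Pre_order_l_l_sym l_l_sym) := by
  unfold Pre_order_l_l_sym; infer_instance

def pvWitness_order_l_l_sym : List (List String) :=
  [["1", "g", "x"], ["1", "g", "z"], ["1", "g", "y"], ["2", "g", "s"]]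

def Spec_order_l_l_sym (l_l_sym : List (List String)) (out : List (List String)) : Prop :=
  out = order_l_l_sym_alt l_l_sym
instance (l_l_sym : List (List String)) (out : List (List String)) :
    Decidable (Spec_order_l_l_sym l_l_sym out) := by unfold Spec_order_l_l_sym; infer_instance

-- ===== CLAIM (what is proved, stated in full; the proofs are below) =====
def Claim_equal_order_l_l_sym : Prop :=
  ∀ (l_l_sym : List (List String)), Dom_order_l_l_sym l_l_sym →
    Pre_order_l_l_sym l_l_sym → Spec_order_l_l_sym l_l_sym (order_l_l_sym l_l_sym)

-- ===== LEMMAS AND PROOFS =====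

-- B's group counts are positive
theorem permCount_toNat_pos (s : String) : 1 ≤ (permCount s).toNat := by
  unfold permCount
  split
  · decide
  · have h : ((s.toList.length : Int) + 1) * ((s.toList.length : Int) + 2)
        = ((s.toList.length + 1) * (s.toList.length + 2) : Nat) := by push_cast; ring
    rw [h, show (2 : Int) = ((2 : Nat) : Int) from rfl, PySem.Int.floordiv_natCast]
    have h2 : 2 ≤ (s.toList.length + 1) * (s.toList.length + 2) := by nlinarith
    simp only [Int.toNat_natCast]
    omega


-- n_orbital's recurrence has the closed form B uses
theorem n_orbital_closed (k : Nat) : 2 * n_orbital k = ((k : Int) + 1) * ((k : Int) + 2) := by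
  induction k using n_orbital.induct with
  | case1 => decide
  | case2 => decide
  | case3 k ih1 ih2 =>
    rw [n_orbital]
    push_cast
    push_cast at ih1 ih2
    linear_combination 2 * ih1 - ih2

theorem get_nb_eq (s : String) : get_nb_permutation s = permCount s := by
  unfold get_nb_permutation permCount
  split
  · rfl
  · have h : ((s.toList.length : Int) + 1) * ((s.toList.length : Int) + 2)
        = ((s.toList.length + 1) * (s.toList.length + 2) : Nat) := by push_cast; ring
    have h2 := n_orbital_closed s.toList.length
    have hfd : PySem.Int.floordiv (((s.toList.length + 1) * (s.toList.length + 2) : Nat) : Int) 2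
        = (((s.toList.length + 1) * (s.toList.length + 2)) / 2 : Nat) := by
      exact_mod_cast PySem.Int.floordiv_natCast ((s.toList.length + 1) * (s.toList.length + 2)) 2
    simp only [h, hfd]
    omega

theorem permCount_pos (s : String) : 1 ≤ permCount s := by
  have := permCount_toNat_pos s
  omega

-- insertBy only depends on 'before' at the inserted element and the list's members
theorem insertBy_congr {α : Type} (b1 b2 : α → α → Bool) (x : α) (ys : List α)
    (h : ∀ y ∈ ys, b1 x y = b2 x y) :
    PySem.List.insertBy b1 x ys = PySem.List.insertBy b2 x ys := by
  induction ys with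
  | nil => rfl
  | cons y ys ih =>
    simp only [PySem.List.insertBy]
    rw [h y (by simp)]
    split
    · rfl
    · rw [ih (fun z hz => h z (by simp [hz]))]

theorem foldl_insertBy_congr {α : Type} (b1 b2 : α → α → Bool) (xs acc : List α)
    (h : ∀ a ∈ acc ++ xs, ∀ c ∈ acc ++ xs, b1 a c = b2 a c) :
    xs.foldl (fun a x => PySem.List.insertBy b1 x a) acc
      = xs.foldl (fun a x => PySem.List.insertBy b2 x a) acc := by
  induction xs generalizing acc with
  | nil => rfl
  | cons x xs ih =>
    simp only [List.foldl_cons]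
    have hx : PySem.List.insertBy b1 x acc = PySem.List.insertBy b2 x acc :=
      insertBy_congr b1 b2 x acc (fun y hy => h x (by simp) y (by simp [hy]))
    rw [hx]
    apply ih
    intro a ha c hc
    have ha' : a ∈ acc ++ x :: xs := by
      simp only [List.mem_append, PySem.List.mem_insertBy, List.mem_cons] at *
      tauto
    have hc' : c ∈ acc ++ x :: xs := by
      simp only [List.mem_append, PySem.List.mem_insertBy, List.mem_cons] at *
      tauto
    exact h a ha' c hc'

theorem foldl_insertBy_false {α : Type} (b : α → α → Bool) (xs : List α) :
    ∀ acc, (∀ x ∈ xs, ∀ y ∈ acc ++ xs, b x y = false) →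
    xs.foldl (fun a x => PySem.List.insertBy b x a) acc = acc ++ xs := by
  induction xs with
  | nil => intro acc _; simp
  | cons x xs ih =>
    intro acc h
    simp only [List.foldl_cons]
    rw [PySem.List.insertBy_of_forall_not_before b x acc
      (fun y hy => h x (by simp) y (by simp [hy]))]
    rw [ih (acc ++ [x]) ?_]
    · simp
    · intro z hz y hy
      apply h z (by simp [hz])
      simp only [List.mem_append, List.mem_cons] at *
      tauto

-- the conditions preCheck states for one group
def GroupOK (lbl : String) (g : List (List String)) : Prop :=
  ∀ e ∈ g, 2 < e.length ∧ (PySem.List.pyGetD e 2 "").toList.length = lbl.toList.length ∧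
    (∀ order, gmsOrder? lbl.toList.length = some order →
      (PySem.List.index? order (PySem.List.pyGetD e 2 "")).isSome = true)

-- the comparator-based sort of A equals the key-based (or skipped) sort of B on a good group
theorem sortA_small (g : List (List String)) (hlen : g.length ≤ 1) : sortA g = g := by
  match g, hlen with
  | [], _ => rfl
  | [x], _ => simp [sortA, PySem.List.insertBy]

theorem bGroup_small (lbl : String) (g : List (List String)) (hlen : g.length ≤ 1) :
    bGroup lbl g = g := by
  unfold bGroup
  rcases hg : gmsOrder? lbl.toList.length with _ | order
  · rfl
  · have : ¬ 1 < g.length := by omega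
    dsimp only
    rw [if_neg this]

-- the comparator-based sort of A equals the key-based (or skipped) sort of B on a good group
theorem sortA_eq_bGroup (lbl : String) (g : List (List String))
    (hok : g.length ≤ 1 ∨ GroupOK lbl g) : sortA g = bGroup lbl g := by
  rcases hok with hlen | hok
  · rw [sortA_small g hlen, bGroup_small lbl g hlen]
  · unfold bGroup
    cases hg : gmsOrder? lbl.toList.length with
    | none =>
      -- comparator returns 0 on every pair: the stable sort is the identity
      unfold sortA
      rw [foldl_insertBy_false _ _ [] ?_]
      · simp
      · intro x hx y hy
        simp only [List.nil_append] at hx hy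
        obtain ⟨_, hlx, _⟩ := hok x hx
        obtain ⟨_, hly, _⟩ := hok y hy
        simp only [compare_gamess_style, hlx, hly, hg]
        simp
    | some order =>
      by_cases hlen : 1 < g.length
      · simp only [hlen, if_true]
        rw [PySem.List.sorted_eq_foldl_insertBy]
        unfold sortA
        apply foldl_insertBy_congr
        intro a ha c hc
        simp only [List.nil_append] at ha hc
        obtain ⟨_, hla, hia⟩ := hok a ha
        obtain ⟨_, hlc, hic⟩ := hok c hc
        obtain ⟨ia, hia'⟩ := Option.isSome_iff_exists.mp (hia order hg)
        obtain ⟨ic, hic'⟩ := Option.isSome_iff_exists.mp (hic order hg)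
        simp only [compare_gamess_style, hla, hlc, hg, bKey, hia', hic', pyCmp,
          Option.getD_some]
        by_cases h : ia < ic <;> by_cases h' : ic < ia <;>
          simp_all <;> omega
      · rw [Nat.not_lt] at hlen
        simp only [if_neg (by omega : ¬ 1 < g.length)]
        exact sortA_small g (by omega)

-- decrementing phase of A's loop: d indices with counter m > d just count down
theorem decr_loop (d : Nat) : ∀ (j m : Int) (lst : List (List String)), (d : Int) < m →
    (PySem.List.pyRange j (j + d)).foldl aBody (m, lst) = (m - d, lst) := by
  induction d with
  | zero =>
    intro j m lst _
    simp [PySem.List.pyRange]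
  | succ d ih =>
    intro j m lst hm
    push_cast at hm
    rw [PySem.List.pyRange_one_cons (by omega)]
    simp only [List.foldl_cons]
    have hb : aBody (m, lst) j = (m - 1, lst) := by
      unfold aBody
      rw [if_pos (by simp only; omega)]
    rw [hb]
    have he : j + ((d + 1 : Nat) : Int) = (j + 1) + (d : Nat) := by push_cast; ring
    rw [he, ih (j + 1) (m - 1) lst (by omega)]
    have : m - 1 - (d : Int) = m - ((d + 1 : Nat) : Int) := by push_cast; ring
    rw [this]

-- the length of a transformed group is the group's length
theorem bGroup_length (lbl : String) (g : List (List String)) :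
    (bGroup lbl g).length = g.length := by
  unfold bGroup
  rcases gmsOrder? lbl.toList.length with _ | order
  · rfl
  · dsimp only
    by_cases h : 1 < g.length
    · rw [if_pos h, PySem.List.length_sorted]
    · rw [if_neg h]

-- evaluating A's loop body at the head of a group
theorem aBody_start (pre : List (List String)) (h : List String) (t : List (List String)) :
    aBody (1, pre ++ h :: t) (pre.length : Int)
      = (permCount (PySem.List.pyGetD h 2 ""),
          pre ++ sortA ((h :: t).take (permCount (PySem.List.pyGetD h 2 "")).toNat)
              ++ (h :: t).drop (permCount (PySem.List.pyGetD h 2 "")).toNat) := by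
  have hget : PySem.List.pyGetD (pre ++ h :: t) (pre.length : Int) [] = h := by
    rw [PySem.List.pyGetD_natCast]
    simp [List.getD_eq_getElem?_getD]
  set lbl := PySem.List.pyGetD h 2 "" with hlbl
  set nI := permCount lbl with hnI
  have hpos : 1 ≤ nI := permCount_pos lbl
  have hc : nI = ((nI.toNat : Nat) : Int) := by omega
  unfold aBody
  rw [if_neg (by simp)]
  simp only [hget, get_nb_eq, ← hlbl, ← hnI]
  have h1 : PySem.List.slice (pre ++ h :: t) none (some (pre.length : Int))
      = pre := by
    rw [PySem.List.slice_to _ (by positivity)]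
    simp
  have hsum : (pre.length : Int) + nI = ((pre.length + nI.toNat : Nat) : Int) := by
    omega
  have h2 : PySem.List.slice (pre ++ h :: t) (some (pre.length : Int))
        (some ((pre.length : Int) + nI)) = (h :: t).take nI.toNat := by
    rw [hsum, show ((pre.length : Nat) : Int) = ((pre.length : Nat) : Int) from rfl,
        PySem.List.slice_natCast]
    simp
  have h3 : PySem.List.slice (pre ++ h :: t) (some ((pre.length : Int) + nI)) none
      = (h :: t).drop nI.toNat := by
    rw [hsum, PySem.List.slice_from _ (by positivity)]
    simp only [Int.toNat_natCast]
    exact List.drop_length_add_append nI.toNat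
  rw [h1, h2, h3]

-- the main loop invariant
theorem mainA (fuel : Nat) (rest pre : List (List String)) (hf : rest.length ≤ fuel)
    (hpre : preCheck fuel rest = true) :
    ((PySem.List.pyRange (pre.length : Int) ((pre.length : Int) + rest.length)).foldl aBody
      (1, pre ++ rest)).2 = pre ++ bGo fuel rest := by
  match fuel, rest with
  | fuel, [] => cases fuel <;> simp [PySem.List.pyRange, bGo]
  | 0, h :: t => simp at hf
  | fuel + 1, h :: t =>
    rw [preCheck] at hpre
    simp only [Bool.and_eq_true, Bool.or_eq_true, decide_eq_true_eq] at hpre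
    obtain ⟨hh, hgrp, hrest⟩ := hpre
    set lbl := PySem.List.pyGetD h 2 "" with hlbl
    set n := (permCount lbl).toNat with hn
    have hpos : 1 ≤ n := permCount_toNat_pos lbl
    set g : List (List String) := (h :: t).take n with hg
    set rest' : List (List String) := (h :: t).drop n with hrest'
    have hok : g.length ≤ 1 ∨ GroupOK lbl g := by
      rcases hgrp with hsm | hall
      · exact Or.inl hsm
      · right
        intro e he
        have := List.all_eq_true.mp hall e he
        simp only [Bool.and_eq_true, decide_eq_true_eq, beq_iff_eq] at this
        refine ⟨this.1.1, this.1.2, ?_⟩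
        intro order horder
        have h2 := this.2
        rw [horder] at h2
        exact h2
    have hsort : sortA g = bGroup lbl g := sortA_eq_bGroup lbl g hok
    have hlen : (bGroup lbl g).length = g.length := bGroup_length lbl g
    have hL1 : 1 ≤ (h :: t).length := by simp
    have hcons : PySem.List.pyRange (pre.length : Int)
          ((pre.length : Int) + (h :: t).length)
        = (pre.length : Int)
            :: PySem.List.pyRange ((pre.length : Int) + 1)
                 ((pre.length : Int) + (h :: t).length) := by
      exact PySem.List.pyRange_one_cons (by omega)
    rw [hcons]
    simp only [List.foldl_cons]
    rw [aBody_start pre h t, ← hlbl, ← hn, ← hg, ← hrest', hsort]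
    have hcast : permCount lbl = ((n : Nat) : Int) := by
      have := permCount_pos lbl; omega
    rw [hcast]
    by_cases hcase : (h :: t).length ≤ n
    · -- the group swallows the whole remaining list; the loop only counts down
      have hgall : g = h :: t := by rw [hg, List.take_of_length_le hcase]
      have hrnil : rest' = [] := by rw [hrest', List.drop_eq_nil_iff.mpr hcase]
      have hend : (pre.length : Int) + (h :: t).length
          = ((pre.length : Int) + 1) + (((h :: t).length - 1 : Nat) : Int) := by
        omega
      rw [hend, decr_loop ((h :: t).length - 1) _ _ _ (by omega)]
      rw [bGo]
      simp only [← hlbl, ← hn, ← hg, ← hrest', hrnil, hgall]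
      simp [bGo]
    · rw [Nat.not_le] at hcase
      have hglen : g.length = n := by
        rw [hg, List.length_take]; omega
      have hrlen : rest'.length = (h :: t).length - n := by
        rw [hrest', List.length_drop]
      have hsplit : PySem.List.pyRange ((pre.length : Int) + 1)
            ((pre.length : Int) + (h :: t).length)
          = PySem.List.pyRange ((pre.length : Int) + 1) ((pre.length : Int) + n)
            ++ PySem.List.pyRange ((pre.length : Int) + n)
                 ((pre.length : Int) + (h :: t).length) :=
        PySem.List.pyRange_one_append _ _ _ (by omega) (by omega)
      rw [hsplit, List.foldl_append]
      have hmid : (pre.length : Int) + n = ((pre.length : Int) + 1) + ((n - 1 : Nat) : Int) := by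
        omega
      rw [hmid, decr_loop (n - 1) _ _ _ (by omega)]
      have hone : ((n : Nat) : Int) - ((n - 1 : Nat) : Int) = 1 := by omega
      rw [hone]
      -- recurse on the rest with the sorted group appended to the prefix
      have hpre' : ((pre ++ bGroup lbl g).length : Int) = (pre.length : Int) + n := by
        push_cast [List.length_append, hlen, hglen]; ring
      have hend' : (pre.length : Int) + (h :: t).length
          = (((pre ++ bGroup lbl g).length : Nat) : Int) + rest'.length := by
        rw [hpre']; push_cast [hrlen]; omega
      have hf' : rest'.length ≤ fuel := by
        rw [hrlen]; simp only [List.length_cons] at hf ⊢; omega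
      have ih := mainA fuel rest' (pre ++ bGroup lbl g) hf' hrest
      have hstart : (pre.length : Int) + 1 + ((n - 1 : Nat) : Int)
          = (((pre ++ bGroup lbl g).length : Nat) : Int) := by
        rw [hpre']; omega
      rw [hstart, hend', ih]
      rw [bGo]
      simp only [← hlbl, ← hn, ← hg, ← hrest']
      simp

-- ===== VERDICT (by name: the statement is the Claim_ definition above) =====
theorem order_l_l_sym_spec : Claim_equal_order_l_l_sym := by
  intro l _ hpre
  unfold Spec_order_l_l_sym order_l_l_sym order_l_l_sym_alt
  have := mainA l.length l [] (le_refl _) hpre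
  simpa using this
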